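-- pv_equiv track=rewrite | github.com/Procrat/typy | examples/don/dumas.py | codeer
-- ===== SOURCE A (Python) =====
-- def codeersleutel(sleuteltekst):
-- 	dict = {}
-- 	kopie = sleuteltekst.replace(' ','')
-- 	lijst = list(enumerate(kopie))
-- 	for x in lijst:
-- 		if x[1] != ' ':
-- 			letter = x[1].capitalize()
-- 			if letter not in dict:
-- 				dict[letter] = []
-- 			dict[letter].append(1 + x[0])
-- 	return dict
--
-- def codeer(tekst, sleuteltekst):
-- 	lijst = []
-- 	sleutel = codeersleutel(sleuteltekst)
-- 	for x in tekst:
-- 		letter = x.capitalize()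
-- 		lijst.append(sleutel[letter][0])
-- 		sleutel[letter] = roteer(sleutel[letter])
-- 	return lijst
--
-- def roteer(lijst):
--     return lijst[1:] + lijst[:1]
-- ===== SOURCE B (Python) =====
-- def codeersleutel(sleuteltekst):
-- 	dict = {}
-- 	kopie = sleuteltekst.replace(' ','')
-- 	lijst = list(enumerate(kopie))
-- 	for x in lijst:
-- 		if x[1] != ' ':
-- 			letter = x[1].capitalize()
-- 			if letter not in dict:
-- 				dict[letter] = []
-- 			dict[letter].append(1 + x[0])
-- 	return dict
--
-- def codeer(tekst, sleuteltekst):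
-- 	sleutel = codeersleutel(sleuteltekst)
-- 	groepen = {}
-- 	for i, x in enumerate(tekst):
-- 		groepen.setdefault(x.capitalize(), []).append(i)
-- 	uit = [None] * len(tekst)
-- 	for letter, plekken in groepen.items():
-- 		vals = sleutel[letter]
-- 		for j, i in enumerate(plekken):
-- 			uit[i] = vals[j % len(vals)]
-- 	return uit
-- ===== Notes on version B (the rewrite author's own statement) =====
-- stated objective: faster
-- what changed: Replaces A's single pass that repeatedly takes the head of a letter's position list and reassigns a rotated copy of it with a group-then-scatter shape: one pass groups the indices of tekst by capitalized letter, then a second pass writes vals[j % len(vals)] into a preallocated result at each group's j-th recorded index, cycling by modular arithmetic instead of list rotation.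
import Mathlib
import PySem

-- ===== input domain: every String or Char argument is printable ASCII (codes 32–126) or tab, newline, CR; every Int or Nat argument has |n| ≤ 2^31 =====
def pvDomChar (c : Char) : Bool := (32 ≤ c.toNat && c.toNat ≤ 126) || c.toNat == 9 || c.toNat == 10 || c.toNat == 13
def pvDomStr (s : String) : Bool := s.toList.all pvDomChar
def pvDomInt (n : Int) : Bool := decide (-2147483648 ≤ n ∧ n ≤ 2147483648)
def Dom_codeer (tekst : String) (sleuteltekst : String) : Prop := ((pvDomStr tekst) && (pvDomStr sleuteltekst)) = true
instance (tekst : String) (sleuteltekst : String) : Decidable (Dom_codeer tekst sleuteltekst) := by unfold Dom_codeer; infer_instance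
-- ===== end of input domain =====

-- B replaces A's take-head-and-rotate single pass by a group-indices-then-scatter two-pass
-- shape that cycles with modular arithmetic; return values agree on Pre_ (where the Python A
-- returns without raising KeyError).

-- ===== PORT A =====
-- codeersleutel: identical helper in Source A and Source B (Source B keeps A's key builder verbatim),
-- so both ports share this one transliteration of it.
def codeersleutel_impl (sleuteltekst : String) : PySem.Dict Char (List Int) :=
  (PySem.List.enumerate (PySem.Str.replace sleuteltekst " " "").toList).foldl
    (fun d x =>
      if x.2 ≠ ' ' then
        let letter := PySem.Chars.upperChar x.2
        let d' := if d.contains letter then d else d.insert letter ([] : List Int)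
        d'.modify letter [] (fun l => l ++ [1 + x.1])   -- dict[letter].append(1 + x[0])
      else d)
    PySem.Dict.empty

def roteer (lijst : List Int) : List Int :=
  PySem.List.slice lijst (some 1) none ++ PySem.List.slice lijst none (some 1)

def codeer (tekst : String) (sleuteltekst : String) : List Int :=
  (tekst.toList.foldl
    (fun (st : List Int × PySem.Dict Char (List Int)) x =>
      let letter := PySem.Chars.upperChar x
      -- sleutel[letter][0] raises KeyError/IndexError when the letter is absent; Pre_ excludes
      -- those inputs, so the total defaults ([], 0) are never reached under Pre_.
      let v := st.2.getD letter []
      (st.1 ++ [PySem.List.pyGetD v 0 0], st.2.insert letter (roteer v)))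
    ([], codeersleutel_impl sleuteltekst)).1

-- ===== PORT B =====
def codeer_alt (tekst : String) (sleuteltekst : String) : List Int :=
  let sleutel := codeersleutel_impl sleuteltekst
  let groepen := (PySem.List.enumerate tekst.toList).foldl
      (fun d p => d.modify (PySem.Chars.upperChar p.2) [] (fun l => l ++ [p.1]))  -- setdefault(...,[]).append(i)
      PySem.Dict.empty
  let uit0 : List Int := List.replicate tekst.toList.length 0   -- [None]*len(tekst); every cell is overwritten before return, placeholder 0
  groepen.items.foldl
    (fun uit kv =>
      -- sleutel[letter] raises KeyError when absent; Pre_ excludes those inputs (default [] unreached)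
      let vals := sleutel.getD kv.1 []
      (PySem.List.enumerate kv.2).foldl
        (fun u q => PySem.List.pySetD u q.2
          (PySem.List.pyGetD vals (PySem.Int.mod q.1 (vals.length : Int)) 0))   -- uit[i] = vals[j % len(vals)]
        uit)
    uit0

-- ===== PRECONDITION & SPEC =====
-- Pre_ excludes exactly the inputs on which the Python A raises (KeyError: some character of
-- tekst whose capitalized form is not a key of the codeersleutel dict, i.e. not the capitalized
-- form of any non-space character of sleuteltekst); B raises there too.
def Pre_codeer (tekst : String) (sleuteltekst : String) : Prop :=
  tekst.toList.all (fun c =>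
    ((sleuteltekst.toList.filter (fun d => !(d == ' '))).map PySem.Chars.upperChar).contains
      (PySem.Chars.upperChar c)) = true
instance (tekst : String) (sleuteltekst : String) : Decidable (Pre_codeer tekst sleuteltekst) := by
  unfold Pre_codeer; infer_instance

def pvWitness_codeer : String × String := ("Abba", "bace")

def Spec_codeer (tekst : String) (sleuteltekst : String) (out : List Int) : Prop := out = codeer_alt tekst sleuteltekst
instance (tekst : String) (sleuteltekst : String) (out : List Int) : Decidable (Spec_codeer tekst sleuteltekst out) := by unfold Spec_codeer; infer_instance

-- ===== CLAIM (what is proved, stated in full; the proofs are below) =====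
def Claim_equal_codeer : Prop := ∀ (tekst : String) (sleuteltekst : String), Dom_codeer tekst sleuteltekst → Pre_codeer tekst sleuteltekst → Spec_codeer tekst sleuteltekst (codeer tekst sleuteltekst)

-- ===== LEMMAS AND PROOFS =====

-- The common pointwise target: element t of the output is
--   vals(upper L[t]) [ (number of earlier occurrences of the same capitalized letter) % len(vals) ].
def pvTarget (orig : Char → List Int) (L : List Char) : List Int :=
  (PySem.List.enumerate L).map (fun p =>
    PySem.List.pyGetD (orig (PySem.Chars.upperChar p.2))
      (PySem.Int.mod (((L.take p.1.toNat).countP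
          (fun y => PySem.Chars.upperChar y == PySem.Chars.upperChar p.2) : Nat) : Int)
        ((orig (PySem.Chars.upperChar p.2)).length : Int)) 0)

-- A-side reference run: per-letter rotation counts instead of the mutating dict.
def pvRefRun (orig : Char → List Int) (cnt : Char → Nat) : List Char → List Int
  | [] => []
  | c :: cs =>
    PySem.List.pyGetD ((orig (PySem.Chars.upperChar c)).rotate (cnt (PySem.Chars.upperChar c))) 0 0
      :: pvRefRun orig (fun K => if K = PySem.Chars.upperChar c then cnt K + 1 else cnt K) cs

lemma roteer_eq_rotate (l : List Int) : roteer l = l.rotate 1 := by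
  cases l with
  | nil => rfl
  | cons a as =>
    simp [roteer, PySem.List.slice_from (a := (1:Int)) _ (by norm_num),
      PySem.List.slice_to (b := (1:Int)) _ (by norm_num),
      List.rotate_eq_drop_append_take (by simp : 1 ≤ (a :: as).length)]

lemma rot_head (v : List Int) (j : Nat) :
    PySem.List.pyGetD (v.rotate j) 0 0
      = PySem.List.pyGetD v (PySem.Int.mod (j : Int) (v.length : Int)) 0 := by
  cases v with
  | nil => simp [PySem.List.pyGetD, PySem.List.pyGet?, PySem.List.pyIdx?]
  | cons a as =>
    have hlen : 0 < (a :: as).length := by simp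
    rw [PySem.Int.mod_natCast j (a :: as).length, PySem.List.pyGetD_natCast]
    rw [show ((0:Int)) = ((0:Nat) : Int) from rfl, PySem.List.pyGetD_natCast]
    have hr : 0 < ((a :: as).rotate j).length := by simp [List.length_rotate]
    have hm : j % (a :: as).length < (a :: as).length := Nat.mod_lt _ hlen
    rw [List.getD_eq_getElem _ _ hr, List.getD_eq_getElem _ _ hm]
    simp [List.getElem_rotate]

lemma loopA (orig : Char → List Int) (rest : List Char) :
    ∀ (acc : List Int) (d : PySem.Dict Char (List Int)) (cnt : Char → Nat),
    (∀ K, d.getD K [] = (orig K).rotate (cnt K)) →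
    (rest.foldl
      (fun (st : List Int × PySem.Dict Char (List Int)) x =>
        let letter := PySem.Chars.upperChar x
        let v := st.2.getD letter []
        (st.1 ++ [PySem.List.pyGetD v 0 0], st.2.insert letter (roteer v)))
      (acc, d)).1
    = acc ++ pvRefRun orig cnt rest := by
  induction rest with
  | nil => intro acc d cnt _; simp [pvRefRun]
  | cons c cs ih =>
    intro acc d cnt hinv
    simp only [List.foldl_cons]
    rw [ih (acc ++ [PySem.List.pyGetD (d.getD (PySem.Chars.upperChar c) []) 0 0])
        (d.insert (PySem.Chars.upperChar c) (roteer (d.getD (PySem.Chars.upperChar c) [])))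
        (fun K => if K = PySem.Chars.upperChar c then cnt K + 1 else cnt K) ?_]
    · rw [hinv]
      simp [pvRefRun]
    · intro K
      rw [PySem.Dict.getD_insert]
      by_cases h : K = PySem.Chars.upperChar c
      · subst h
        simp [hinv, roteer_eq_rotate, List.rotate_rotate]
      · simp [h, hinv K]

lemma refRun_spec (orig : Char → List Int) (rest : List Char) :
    ∀ (pre : List Char),
    pvRefRun orig (fun K => pre.countP (fun y => PySem.Chars.upperChar y == K)) rest
      = (PySem.List.enumerate rest (pre.length : Int)).map (fun p =>
          PySem.List.pyGetD (orig (PySem.Chars.upperChar p.2))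
            (PySem.Int.mod ((((pre ++ rest).take p.1.toNat).countP
                (fun y => PySem.Chars.upperChar y == PySem.Chars.upperChar p.2) : Nat) : Int)
              ((orig (PySem.Chars.upperChar p.2)).length : Int)) 0) := by
  induction rest with
  | nil => intro pre; simp [pvRefRun, PySem.List.enumerate]
  | cons c cs ih =>
    intro pre
    rw [PySem.List.enumerate_cons, List.map_cons]
    show PySem.List.pyGetD ((orig (PySem.Chars.upperChar c)).rotate
          (pre.countP (fun y => PySem.Chars.upperChar y == PySem.Chars.upperChar c))) 0 0
        :: pvRefRun orig _ cs = _
    congr 1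
    · rw [rot_head]
      have h1 : ((pre.length : Int)).toNat = pre.length := by simp
      simp only [h1, List.take_left]
    · have hcnt : (fun K => if K = PySem.Chars.upperChar c
            then pre.countP (fun y => PySem.Chars.upperChar y == K) + 1
            else pre.countP (fun y => PySem.Chars.upperChar y == K))
          = (fun K => (pre ++ [c]).countP (fun y => PySem.Chars.upperChar y == K)) := by
        funext K
        rw [List.countP_append]
        by_cases h : K = PySem.Chars.upperChar c
        · subst h; simp
        · have hfalse : (PySem.Chars.upperChar c == K) = false := by
            simp only [beq_eq_false_iff_ne, ne_eq]
            exact fun hh => h (Eq.symm hh)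
          simp [hfalse, h]
      rw [hcnt, ih (pre ++ [c])]
      have h2 : ((pre ++ [c]).length : Int) = (pre.length : Int) + 1 := by simp
      rw [h2, List.append_assoc]
      rfl

lemma codeer_eq_target (tekst sleuteltekst : String) :
    codeer tekst sleuteltekst
      = pvTarget (fun K => (codeersleutel_impl sleuteltekst).getD K []) tekst.toList := by
  unfold codeer pvTarget
  rw [loopA (fun K => (codeersleutel_impl sleuteltekst).getD K []) tekst.toList []
      (codeersleutel_impl sleuteltekst) (fun _ => 0) (fun K => by simp)]
  have h0 : (fun _ : Char => (0:Nat))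
      = (fun K => ([] : List Char).countP (fun y => PySem.Chars.upperChar y == K)) := by
    funext K; simp
  rw [h0, refRun_spec]
  simp only [List.nil_append, List.length_nil, Nat.cast_zero]


-- ===== B-side: grouping and scatter =====

-- positions (as enumerate indices, start s) of the characters of l satisfying q, in order
def pvPos (q : Char → Bool) (l : List Char) (s : Int) : List Int :=
  ((PySem.List.enumerate l s).filter (fun p => q p.2)).map (fun p => p.1)

lemma pvPos_nodup (q : Char → Bool) (l : List Char) (s : Int) : (pvPos q l s).Nodup := by
  have h1 : ((PySem.List.enumerate l s).filter (fun p => q p.2)).Pairwise (fun p q => p.1 < q.1) :=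
    List.Pairwise.filter _ (PySem.List.pairwise_lt_enumerate l s)
  have h2 : (pvPos q l s).Pairwise (· < ·) := by
    unfold pvPos
    exact (List.pairwise_map).mpr h1
  exact h2.imp (fun h => ne_of_lt h)

lemma pvPos_mem (q : Char → Bool) (l : List Char) (s : Int) (i : Int) (h : i ∈ pvPos q l s) :
    ∃ (t : Nat), ∃ (ht : t < l.length), i = s + t ∧ q l[t] = true := by
  unfold pvPos at h
  rcases List.mem_map.mp h with ⟨p, hp, rfl⟩
  rcases List.mem_filter.mp hp with ⟨hpe, hq⟩
  rcases (PySem.List.mem_enumerate_iff l s p).mp hpe with ⟨t, ht, rfl⟩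
  exact ⟨t, ht, rfl, hq⟩

lemma pvPos_cons (q : Char → Bool) (c : Char) (cs : List Char) (s : Int) :
    pvPos q (c :: cs) s = if q c then s :: pvPos q cs (s + 1) else pvPos q cs (s + 1) := by
  unfold pvPos
  rw [PySem.List.enumerate_cons]
  by_cases hc : q c <;> simp [hc]

lemma pvPos_core (q : Char → Bool) (l : List Char) :
    ∀ (s : Int) (t : Nat) (ht : t < l.length), q l[t] = true →
    ∃ (hj : (l.take t).countP q < (pvPos q l s).length),
      (pvPos q l s)[(l.take t).countP q] = s + t := by
  induction l with
  | nil => intro s t ht; simp at ht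
  | cons c cs ih =>
    intro s t ht hq
    cases t with
    | zero =>
      simp only [List.getElem_cons_zero] at hq
      rw [pvPos_cons, if_pos hq]
      simp
    | succ t' =>
      simp only [List.getElem_cons_succ] at hq
      have ht' : t' < cs.length := by simpa using ht
      rcases ih (s + 1) t' ht' hq with ⟨hj, hval⟩
      rw [pvPos_cons]
      have hcast : s + (((t' + 1 : Nat)) : Int) = (s + 1) + (t' : Int) := by push_cast; ring
      by_cases hc : q c
      · rw [if_pos hc]
        simp only [List.take_succ_cons, List.countP_cons, hc, if_pos]
        refine ⟨by simpa using Nat.succ_lt_succ hj, ?_⟩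
        simp only [List.getElem_cons_succ]
        rw [hcast]
        exact hval
      · rw [if_neg hc]
        simp only [List.take_succ_cons, List.countP_cons, hc,
          Bool.false_eq_true, if_false, Nat.add_zero]
        refine ⟨hj, ?_⟩
        rw [hcast]
        exact hval

-- fold of index/value writes
lemma pvSetFold_length (ws : List (Int × Int)) :
    ∀ (u : List Int),
    (ws.foldl (fun u w => PySem.List.pySetD u w.1 w.2) u).length = u.length := by
  induction ws with
  | nil => intro u; rfl
  | cons w ws ih =>
    intro u
    rw [List.foldl_cons, ih]
    simp [PySem.List.length_pySetD]

lemma pvSetFold_not_mem (ws : List (Int × Int)) :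
    ∀ (u : List Int) (t : Nat),
    (∀ w ∈ ws, 0 ≤ w.1) → ((t : Int) ∉ ws.map (fun w => w.1)) →
    (ws.foldl (fun u w => PySem.List.pySetD u w.1 w.2) u)[t]? = u[t]? := by
  induction ws with
  | nil => intro u t _ _; rfl
  | cons w ws ih =>
    intro u t hpos hmem
    rw [List.map_cons] at hmem
    have hne : (t : Int) ≠ w.1 := fun h => hmem (h ▸ List.mem_cons_self)
    have hmemtail : (t : Int) ∉ ws.map (fun w => w.1) :=
      fun h => hmem (List.mem_cons_of_mem _ h)
    rw [List.foldl_cons, ih _ t (fun x hx => hpos x (by simp [hx])) hmemtail]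
    rw [PySem.List.pySetD_of_nonneg _ _ (hpos w List.mem_cons_self)]
    apply List.getElem?_set_ne
    have := hpos w List.mem_cons_self
    omega

lemma pvSetFold_mem (ws : List (Int × Int)) :
    ∀ (u : List Int) (t : Nat) (v : Int),
    (∀ w ∈ ws, 0 ≤ w.1) → ((ws.map (fun w => w.1)).Nodup) →
    ((t : Int), v) ∈ ws → t < u.length →
    (ws.foldl (fun u w => PySem.List.pySetD u w.1 w.2) u)[t]? = some v := by
  induction ws with
  | nil => intro u t v _ _ h; simp at h
  | cons w ws ih =>
    intro u t v hpos hnd hmem hlt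
    rw [List.map_cons] at hnd
    obtain ⟨hhead, htailnd⟩ := List.nodup_cons.mp hnd
    rw [List.foldl_cons]
    rcases List.mem_cons.mp hmem with heq | htail
    · subst heq
      rw [pvSetFold_not_mem ws _ t (fun x hx => hpos x (by simp [hx])) (by simpa using hhead)]
      rw [PySem.List.pySetD_of_nonneg _ _ (Int.natCast_nonneg t)]
      simp only [Int.toNat_natCast]
      exact List.getElem?_set_self hlt
    · apply ih _ t v (fun x hx => hpos x (by simp [hx])) htailnd htail
      rw [PySem.List.length_pySetD]
      exact hlt

lemma pvFoldl_flatMap {A : Type} (l : List A) (g : A → List (Int × Int)) :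
    ∀ (u : List Int),
    l.foldl (fun u a => (g a).foldl (fun u w => PySem.List.pySetD u w.1 w.2) u) u
      = (l.flatMap g).foldl (fun u w => PySem.List.pySetD u w.1 w.2) u := by
  induction l with
  | nil => intro u; rfl
  | cons a l ih =>
    intro u
    rw [List.foldl_cons, ih, List.flatMap_cons, List.foldl_append]

-- write value for key K at cycle position j
def pvVal (orig : Char → List Int) (K : Char) (j : Int) : Int :=
  PySem.List.pyGetD (orig K) (PySem.Int.mod j ((orig K).length : Int)) 0

-- the (index, value) writes of one group
def pvWs (orig : Char → List Int) (kv : Char × List Int) : List (Int × Int) :=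
  (PySem.List.enumerate kv.2).map (fun q => (q.2, pvVal orig kv.1 q.1))

-- the grouping dict of B's first pass
def pvGroepen (L : List Char) : PySem.Dict Char (List Int) :=
  (PySem.List.enumerate L).foldl
    (fun d p => d.modify (PySem.Chars.upperChar p.2) [] (fun l => l ++ [p.1]))
    PySem.Dict.empty

lemma pvGroepen_getD (L : List Char) (K : Char) :
    (pvGroepen L).getD K [] = pvPos (fun y => PySem.Chars.upperChar y == K) L 0 := by
  unfold pvGroepen pvPos
  have h1 : (PySem.List.enumerate L).foldl
        (fun d p => d.modify (PySem.Chars.upperChar p.2) [] (fun l => l ++ [p.1]))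
        PySem.Dict.empty
      = ((PySem.List.enumerate L).map (fun p => (PySem.Chars.upperChar p.2, p.1))).foldl
        (fun d q => d.modify q.1 [] (fun l => l ++ [q.2])) PySem.Dict.empty := by
    rw [List.foldl_map]
  rw [h1, PySem.Dict.getD_foldl_modify_append, PySem.Dict.getD_empty, List.nil_append]
  rw [List.filter_map, List.map_map]
  rfl

lemma pvGroepen_keys_nodup (L : List Char) : (pvGroepen L).keys.Nodup := by
  unfold pvGroepen
  exact PySem.Dict.nodup_keys_foldl_modify_key (PySem.List.enumerate L)
    (fun p => PySem.Chars.upperChar p.2) [] (fun _ p l => l ++ [p.1]) PySem.Dict.empty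
    PySem.Dict.nodup_keys_empty

lemma pvGroepen_mem_keys (L : List Char) (K : Char) :
    K ∈ (pvGroepen L).keys ↔ K ∈ L.map PySem.Chars.upperChar := by
  unfold pvGroepen
  rw [PySem.Dict.keys_foldl_modify_key (PySem.List.enumerate L)
    (fun p => PySem.Chars.upperChar p.2) [] (fun _ p l => l ++ [p.1]) PySem.Dict.empty]
  rw [PySem.Dict.keys_empty, PySem.Set.mem_update]
  have h2 : (PySem.List.enumerate L).map (fun p => PySem.Chars.upperChar p.2)
      = L.map PySem.Chars.upperChar := by
    rw [show (fun p : Int × Char => PySem.Chars.upperChar p.2)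
        = PySem.Chars.upperChar ∘ (fun p : Int × Char => p.2) from rfl,
      ← List.map_map, PySem.List.map_snd_enumerate]
  rw [h2]
  simp

lemma pvScatter_eq_target (L : List Char) (orig : Char → List Int) :
    (pvGroepen L).items.foldl
      (fun uit kv =>
        (PySem.List.enumerate kv.2).foldl
          (fun u q => PySem.List.pySetD u q.2
            (PySem.List.pyGetD (orig kv.1) (PySem.Int.mod q.1 ((orig kv.1).length : Int)) 0))
          uit)
      (List.replicate L.length 0)
    = pvTarget orig L := by
  -- the whole scatter is one fold over the flattened write list WS
  have hflat : (pvGroepen L).items.foldl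
      (fun uit kv =>
        (PySem.List.enumerate kv.2).foldl
          (fun u q => PySem.List.pySetD u q.2
            (PySem.List.pyGetD (orig kv.1) (PySem.Int.mod q.1 ((orig kv.1).length : Int)) 0))
          uit)
      (List.replicate L.length 0)
    = ((pvGroepen L).items.flatMap (pvWs orig)).foldl
        (fun u w => PySem.List.pySetD u w.1 w.2) (List.replicate L.length 0) := by
    rw [← pvFoldl_flatMap]
    have hfun : (fun (uit : List Int) (kv : Char × List Int) =>
          (PySem.List.enumerate kv.2).foldl
            (fun u q => PySem.List.pySetD u q.2
              (PySem.List.pyGetD (orig kv.1) (PySem.Int.mod q.1 ((orig kv.1).length : Int)) 0))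
            uit)
        = (fun (uit : List Int) (kv : Char × List Int) =>
            (pvWs orig kv).foldl (fun u w => PySem.List.pySetD u w.1 w.2) uit) := by
      funext uit kv
      unfold pvWs pvVal
      rw [List.foldl_map]
    rw [hfun]
  rw [hflat]
  have hitems : (pvGroepen L).items
      = ((pvGroepen L).keys).map
          (fun K => (K, pvPos (fun y => PySem.Chars.upperChar y == K) L 0)) := by
    rw [PySem.Dict.items_eq_map_keys _ (pvGroepen_keys_nodup L) []]
    simp only [pvGroepen_getD]
  have hmap1 : (((pvGroepen L).items.flatMap (pvWs orig)).map (fun w => w.1))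
      = ((pvGroepen L).keys).flatMap
          (fun K => pvPos (fun y => PySem.Chars.upperChar y == K) L 0) := by
    rw [List.map_flatMap, hitems, List.flatMap_map]
    simp [pvWs, List.map_map, Function.comp_def, PySem.List.map_snd_enumerate]
  have hpos : ∀ w ∈ (pvGroepen L).items.flatMap (pvWs orig), 0 ≤ w.1 := by
    intro w hw
    have hw1 : w.1 ∈ ((pvGroepen L).items.flatMap (pvWs orig)).map (fun w => w.1) :=
      List.mem_map.mpr ⟨w, hw, rfl⟩
    rw [hmap1] at hw1
    rcases List.mem_flatMap.mp hw1 with ⟨K, _, hK⟩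
    rcases pvPos_mem _ _ _ _ hK with ⟨t, _, heq, _⟩
    omega
  have hnd : (((pvGroepen L).items.flatMap (pvWs orig)).map (fun w => w.1)).Nodup := by
    rw [hmap1, List.nodup_flatMap]
    constructor
    · intro K _; exact pvPos_nodup _ _ _
    · apply (List.nodup_iff_pairwise_ne.mp (pvGroepen_keys_nodup L)).imp
      intro K K' hne i hi hi'
      rcases pvPos_mem _ _ _ _ hi with ⟨t, ht, hit, hqt⟩
      rcases pvPos_mem _ _ _ _ hi' with ⟨t', ht', hit', hqt'⟩
      have htt : t = t' := by omega
      subst htt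
      rw [beq_iff_eq] at hqt hqt'
      exact hne (hqt ▸ hqt')
  apply List.ext_getElem?
  intro i
  by_cases hi : i < L.length
  · have htar : (pvTarget orig L)[i]?
        = some (pvVal orig (PySem.Chars.upperChar L[i])
            (((L.take i).countP
              (fun y => PySem.Chars.upperChar y == PySem.Chars.upperChar L[i]) : Nat) : Int)) := by
      unfold pvTarget pvVal
      rw [List.getElem?_map, PySem.List.getElem?_enumerate, List.getElem?_eq_getElem hi]
      simp
    obtain ⟨hj, hval⟩ := pvPos_core (fun y => PySem.Chars.upperChar y == PySem.Chars.upperChar L[i])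
        L 0 i hi (by simp)
    have hKmem : PySem.Chars.upperChar L[i] ∈ (pvGroepen L).keys :=
      (pvGroepen_mem_keys L _).mpr (List.mem_map.mpr ⟨L[i], List.getElem_mem hi, rfl⟩)
    have hwrite : (((i : Int)), pvVal orig (PySem.Chars.upperChar L[i])
          (((L.take i).countP
            (fun y => PySem.Chars.upperChar y == PySem.Chars.upperChar L[i]) : Nat) : Int))
        ∈ (pvGroepen L).items.flatMap (pvWs orig) := by
      apply List.mem_flatMap.mpr
      refine ⟨(PySem.Chars.upperChar L[i],
        pvPos (fun y => PySem.Chars.upperChar y == PySem.Chars.upperChar L[i]) L 0), ?_, ?_⟩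
      · rw [hitems]
        exact List.mem_map.mpr ⟨_, hKmem, rfl⟩
      · unfold pvWs
        apply List.mem_map.mpr
        refine ⟨((((L.take i).countP
            (fun y => PySem.Chars.upperChar y == PySem.Chars.upperChar L[i]) : Nat) : Int),
            (pvPos (fun y => PySem.Chars.upperChar y == PySem.Chars.upperChar L[i]) L 0)[(L.take i).countP
              (fun y => PySem.Chars.upperChar y == PySem.Chars.upperChar L[i])]), ?_, ?_⟩
        · exact (PySem.List.mem_enumerate_iff _ 0 _).mpr ⟨_, hj, by simp⟩
        · rw [hval]
          simp
    rw [pvSetFold_mem _ _ i _ hpos hnd hwrite (by simpa using hi), htar]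
  · rw [List.getElem?_eq_none, List.getElem?_eq_none]
    · simp only [pvTarget, List.length_map, PySem.List.length_enumerate]
      omega
    · rw [pvSetFold_length]
      simp only [List.length_replicate]
      omega

lemma codeer_alt_eq_target (tekst sleuteltekst : String) :
    codeer_alt tekst sleuteltekst
      = pvTarget (fun K => (codeersleutel_impl sleuteltekst).getD K []) tekst.toList := by
  show (pvGroepen tekst.toList).items.foldl
      (fun uit kv =>
        (PySem.List.enumerate kv.2).foldl
          (fun u q => PySem.List.pySetD u q.2
            (PySem.List.pyGetD ((codeersleutel_impl sleuteltekst).getD kv.1 [])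
              (PySem.Int.mod q.1 (((codeersleutel_impl sleuteltekst).getD kv.1 []).length : Int)) 0))
          uit)
      (List.replicate tekst.toList.length 0)
    = _
  exact pvScatter_eq_target tekst.toList (fun K => (codeersleutel_impl sleuteltekst).getD K [])

-- ===== VERDICT (by name: the statement is the Claim_ definition above) =====
theorem codeer_spec : Claim_equal_codeer := by
  intro tekst sleuteltekst _ _
  unfold Spec_codeer
  rw [codeer_eq_target, codeer_alt_eq_target]
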